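-- pv_equiv track=rewrite | github.com/udacity/cd14776-ls-workflows-public | lesson-7-Agentic Parallelization Workflows/exercises/solution/solution.py | _extract_gene_context
-- ===== SOURCE A (Python) =====
-- def _extract_gene_context(description: str) -> str:
--     """Extract gene/region context from hit description."""
--     if "intergenic" in description.lower():
--         # Extract nearby gene if mentioned
--         parts = description.split("near ")
--         if len(parts) > 1:
--             return f"Intergenic (near {parts[1].split()[0]})"
--         return "Intergenic"
--     elif "intron" in description.lower():
--         parts = description.split(", ")
--         for part in parts:
--             if "intron" in part.lower():
--                 return part.strip()
--         return "Intronic region"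
--     elif "exon" in description.lower():
--         parts = description.split(", ")
--         for part in parts:
--             if "exon" in part.lower():
--                 return part.strip()
--         return "Exonic region"
--     elif "UTR" in description:
--         parts = description.split(", ")
--         for part in parts:
--             if "UTR" in part:
--                 return part.strip()
--         return "UTR region"
--     return "Unknown region"
-- ===== SOURCE B (Python) =====
-- def _extract_gene_context(description: str) -> str:
--     """Extract gene/region context from hit description."""
--     if "intergenic" in description.lower():
--         parts = description.split("near ")
--         if len(parts) > 1:
--             return f"Intergenic (near {parts[1].split()[0]})"
--         return "Intergenic"
--     # Single pass over the comma-separated parts: record the FIRST part that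
--     # mentions each region keyword in a dict, then resolve by priority.
--     hits = {}
--     for part in description.split(", "):
--         pl = part.lower()
--         if "intron" not in hits and "intron" in pl:
--             hits["intron"] = part.strip()
--         if "exon" not in hits and "exon" in pl:
--             hits["exon"] = part.strip()
--         if "UTR" not in hits and "UTR" in part:
--             hits["UTR"] = part.strip()
--     low = description.lower()
--     if "intron" in low:
--         return hits.get("intron", "Intronic region")
--     if "exon" in low:
--         return hits.get("exon", "Exonic region")
--     if "UTR" in description:
--         return hits.get("UTR", "UTR region")
--     return "Unknown region"
-- ===== Notes on version B (the rewrite author's own statement) =====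
-- stated objective: alternative
-- what changed: A's three elif branches each re-split the description and run their own scan loop for one keyword; B makes a single pass over the comma-split parts accumulating the first matching part per keyword in a dict, then resolves the answer with one priority lookup (intergenic stays a special case).
import Mathlib
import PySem

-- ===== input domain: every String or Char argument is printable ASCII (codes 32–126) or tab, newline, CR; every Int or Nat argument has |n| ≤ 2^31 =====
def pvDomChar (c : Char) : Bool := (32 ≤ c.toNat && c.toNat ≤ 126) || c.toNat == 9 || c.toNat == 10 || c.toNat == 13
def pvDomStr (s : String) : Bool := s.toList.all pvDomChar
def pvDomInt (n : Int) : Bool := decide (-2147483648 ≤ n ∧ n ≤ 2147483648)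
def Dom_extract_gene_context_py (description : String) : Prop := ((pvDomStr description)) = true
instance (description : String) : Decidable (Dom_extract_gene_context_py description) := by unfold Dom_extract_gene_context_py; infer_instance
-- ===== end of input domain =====

-- B replaces A's three per-keyword split-and-scan branches by one pass over the comma-split
-- parts that accumulates the first matching part per keyword in a dict, resolved afterwards
-- by one priority lookup (objective: alternative).

-- ===== PORT A =====
-- A's 'for part in parts: if "intron" in part.lower(): return part.strip()' then default
def pvLoopIntron : List (List Char) → String
  | [] => "Intronic region"
  | p :: rest =>
      if PySem.Chars.isIn "intron".toList (PySem.Chars.lower p) then String.ofList (PySem.Chars.strip p)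
      else pvLoopIntron rest

def pvLoopExon : List (List Char) → String
  | [] => "Exonic region"
  | p :: rest =>
      if PySem.Chars.isIn "exon".toList (PySem.Chars.lower p) then String.ofList (PySem.Chars.strip p)
      else pvLoopExon rest

def pvLoopUTR : List (List Char) → String
  | [] => "UTR region"
  | p :: rest =>
      if PySem.Chars.isIn "UTR".toList p then String.ofList (PySem.Chars.strip p)
      else pvLoopUTR rest

def extract_gene_context_py (description : String) : String :=
  if PySem.Chars.isIn "intergenic".toList (PySem.Chars.lower description.toList) then
    if (PySem.Chars.splitOn description.toList "near ".toList).length > 1 then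
      match PySem.Chars.split₀ ((PySem.Chars.splitOn description.toList "near ".toList).getD 1 []) with
      | tok :: _ => String.ofList ("Intergenic (near ".toList ++ tok ++ ")".toList)
      | [] => ""  -- Python raises IndexError here; excluded by Pre_
    else "Intergenic"
  else if PySem.Chars.isIn "intron".toList (PySem.Chars.lower description.toList) then
    pvLoopIntron (PySem.Chars.splitOn description.toList ", ".toList)
  else if PySem.Chars.isIn "exon".toList (PySem.Chars.lower description.toList) then
    pvLoopExon (PySem.Chars.splitOn description.toList ", ".toList)
  else if PySem.Chars.isIn "UTR".toList description.toList then
    pvLoopUTR (PySem.Chars.splitOn description.toList ", ".toList)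
  else "Unknown region"

-- ===== PORT B =====
-- body of Source B's single 'for part in description.split(", ")' loop
def pvScanStep (d : PySem.Dict String String) (p : List Char) : PySem.Dict String String :=
  let pl := PySem.Chars.lower p
  let d1 := if d.contains "intron" = false ∧ PySem.Chars.isIn "intron".toList pl then
              d.insert "intron" (String.ofList (PySem.Chars.strip p)) else d
  let d2 := if d1.contains "exon" = false ∧ PySem.Chars.isIn "exon".toList pl then
              d1.insert "exon" (String.ofList (PySem.Chars.strip p)) else d1
  if d2.contains "UTR" = false ∧ PySem.Chars.isIn "UTR".toList p then
    d2.insert "UTR" (String.ofList (PySem.Chars.strip p)) else d2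

def extract_gene_context_py_alt (description : String) : String :=
  if PySem.Chars.isIn "intergenic".toList (PySem.Chars.lower description.toList) then
    if (PySem.Chars.splitOn description.toList "near ".toList).length > 1 then
      match PySem.Chars.split₀ ((PySem.Chars.splitOn description.toList "near ".toList).getD 1 []) with
      | tok :: _ => String.ofList ("Intergenic (near ".toList ++ tok ++ ")".toList)
      | [] => ""  -- Python raises IndexError here; excluded by Pre_
    else "Intergenic"
  else
    let hits := (PySem.Chars.splitOn description.toList ", ".toList).foldl pvScanStep PySem.Dict.empty
    let low := PySem.Chars.lower description.toList
    if PySem.Chars.isIn "intron".toList low then hits.getD "intron" "Intronic region"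
    else if PySem.Chars.isIn "exon".toList low then hits.getD "exon" "Exonic region"
    else if PySem.Chars.isIn "UTR".toList description.toList then hits.getD "UTR" "UTR region"
    else "Unknown region"

-- ===== PRECONDITION & SPEC =====
-- Pre_ excludes exactly the inputs on which A (and B) raise IndexError: intergenic-style
-- descriptions where the split piece after the first near-marker has no whitespace-separated token.
def Pre_extract_gene_context_py (description : String) : Prop :=
  (PySem.Chars.isIn "intergenic".toList (PySem.Chars.lower description.toList) = true ∧
     1 < (PySem.Chars.splitOn description.toList "near ".toList).length) →
  PySem.Chars.split₀ ((PySem.Chars.splitOn description.toList "near ".toList).getD 1 []) ≠ []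
instance (description : String) : Decidable (Pre_extract_gene_context_py description) := by
  unfold Pre_extract_gene_context_py; infer_instance

def pvWitness_extract_gene_context_py : String := "intergenic near GENE1"

def Spec_extract_gene_context_py (description : String) (out : String) : Prop :=
  out = extract_gene_context_py_alt description
instance (description : String) (out : String) : Decidable (Spec_extract_gene_context_py description out) := by
  unfold Spec_extract_gene_context_py; infer_instance

-- ===== CLAIM (what is proved, stated in full; the proofs are below) =====
def Claim_equal_extract_gene_context_py : Prop :=
  ∀ (description : String), Dom_extract_gene_context_py description →
    Pre_extract_gene_context_py description →
    Spec_extract_gene_context_py description (extract_gene_context_py description)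

-- ===== LEMMAS AND PROOFS =====
-- first part of the list matching m, stripped
def pvFirstHit (m : List Char → Bool) : List (List Char) → Option String
  | [] => none
  | p :: r => if m p then some (String.ofList (PySem.Chars.strip p)) else pvFirstHit m r

def pvMI (p : List Char) : Bool := PySem.Chars.isIn "intron".toList (PySem.Chars.lower p)
def pvME (p : List Char) : Bool := PySem.Chars.isIn "exon".toList (PySem.Chars.lower p)
def pvMU (p : List Char) : Bool := PySem.Chars.isIn "UTR".toList p

-- a conditional insert at a DIFFERENT key leaves get? k unchanged
theorem pvCondInsert_get?_ne (e : PySem.Dict String String) (k k' s : String) (c : Prop)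
    [Decidable c] (hne : k ≠ k') :
    (if e.contains k' = false ∧ c then e.insert k' s else e).get? k = e.get? k := by
  split_ifs with h
  · exact PySem.Dict.get?_insert_of_ne e s hne
  · rfl

-- a first-write-wins conditional insert, observed at its own key, is Option.or
theorem pvCondInsert_get?_self (e : PySem.Dict String String) (k s : String) (c : Prop)
    [Decidable c] :
    (if e.contains k = false ∧ c then e.insert k s else e).get? k =
      (e.get? k).or (if c then some s else none) := by
  split_ifs with h hc hc
  · rw [PySem.Dict.get?_insert_self, (PySem.Dict.get?_eq_none_iff_contains e k).2 h.1]; rfl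
  · exact absurd h.2 hc
  · have ht : e.contains k = true := by
      cases hcc : e.contains k with
      | false => exact absurd ⟨hcc, hc⟩ h
      | true => rfl
    rw [PySem.Dict.contains_eq_isSome_get?] at ht
    obtain ⟨v, hv⟩ := Option.isSome_iff_exists.mp ht
    rw [hv]; rfl
  · simp

-- one loop step, observed at one key
theorem pvStep_get?_intron (d : PySem.Dict String String) (p : List Char) :
    (pvScanStep d p).get? "intron" =
      (d.get? "intron").or
        (if pvMI p then some (String.ofList (PySem.Chars.strip p)) else none) := by
  unfold pvScanStep pvMI
  rw [pvCondInsert_get?_ne _ "intron" "UTR" _ _ (by decide),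
      pvCondInsert_get?_ne _ "intron" "exon" _ _ (by decide),
      pvCondInsert_get?_self d "intron" _ _]

theorem pvStep_get?_exon (d : PySem.Dict String String) (p : List Char) :
    (pvScanStep d p).get? "exon" =
      (d.get? "exon").or
        (if pvME p then some (String.ofList (PySem.Chars.strip p)) else none) := by
  unfold pvScanStep pvME
  rw [pvCondInsert_get?_ne _ "exon" "UTR" _ _ (by decide),
      pvCondInsert_get?_self _ "exon" _ _,
      pvCondInsert_get?_ne _ "exon" "intron" _ _ (by decide)]

theorem pvStep_get?_UTR (d : PySem.Dict String String) (p : List Char) :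
    (pvScanStep d p).get? "UTR" =
      (d.get? "UTR").or
        (if pvMU p then some (String.ofList (PySem.Chars.strip p)) else none) := by
  unfold pvScanStep pvMU
  rw [pvCondInsert_get?_self _ "UTR" _ _,
      pvCondInsert_get?_ne _ "UTR" "exon" _ _ (by decide),
      pvCondInsert_get?_ne _ "UTR" "intron" _ _ (by decide)]

-- the whole loop, observed at one key: first matching part of the list
theorem pvFoldl_get? (parts : List (List Char)) (m : List Char → Bool)
    (k : String)
    (hstep : ∀ (d : PySem.Dict String String) (p : List Char),
      (pvScanStep d p).get? k =
        (d.get? k).or (if m p then some (String.ofList (PySem.Chars.strip p)) else none)) :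
    ∀ d : PySem.Dict String String,
      (parts.foldl pvScanStep d).get? k = (d.get? k).or (pvFirstHit m parts) := by
  induction parts with
  | nil => intro d; simp [pvFirstHit]
  | cons p r ih =>
      intro d
      simp only [List.foldl_cons, pvFirstHit]
      rw [ih (pvScanStep d p), hstep d p]
      cases m p <;> simp

theorem pvLoopIntron_eq (parts : List (List Char)) :
    pvLoopIntron parts = (pvFirstHit pvMI parts).getD "Intronic region" := by
  induction parts with
  | nil => rfl
  | cons p r ih =>
      simp only [pvLoopIntron, pvFirstHit, pvMI]
      split_ifs with h <;> simp [ih]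

theorem pvLoopExon_eq (parts : List (List Char)) :
    pvLoopExon parts = (pvFirstHit pvME parts).getD "Exonic region" := by
  induction parts with
  | nil => rfl
  | cons p r ih =>
      simp only [pvLoopExon, pvFirstHit, pvME]
      split_ifs with h <;> simp [ih]

theorem pvLoopUTR_eq (parts : List (List Char)) :
    pvLoopUTR parts = (pvFirstHit pvMU parts).getD "UTR region" := by
  induction parts with
  | nil => rfl
  | cons p r ih =>
      simp only [pvLoopUTR, pvFirstHit, pvMU]
      split_ifs with h <;> simp [ih]

theorem pvHits_getD (parts : List (List Char)) (m : List Char → Bool) (k dflt : String)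
    (hstep : ∀ (d : PySem.Dict String String) (p : List Char),
      (pvScanStep d p).get? k =
        (d.get? k).or (if m p then some (String.ofList (PySem.Chars.strip p)) else none)) :
    (parts.foldl pvScanStep PySem.Dict.empty).getD k dflt = (pvFirstHit m parts).getD dflt := by
  rw [PySem.Dict.getD_eq_get?_getD, pvFoldl_get? parts m k hstep PySem.Dict.empty]
  simp

-- ===== VERDICT (by name: the statement is the Claim_ definition above) =====
theorem extract_gene_context_py_spec : Claim_equal_extract_gene_context_py := by
  intro description _ _
  unfold Spec_extract_gene_context_py extract_gene_context_py extract_gene_context_py_alt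
  by_cases h1 : PySem.Chars.isIn "intergenic".toList (PySem.Chars.lower description.toList) = true
  · simp only [h1, if_true]
  · rw [if_neg h1, if_neg h1]
    simp only
    split_ifs with h2 h3 h4
    · rw [pvLoopIntron_eq, pvHits_getD _ pvMI "intron" _ pvStep_get?_intron]
    · rw [pvLoopExon_eq, pvHits_getD _ pvME "exon" _ pvStep_get?_exon]
    · rw [pvLoopUTR_eq, pvHits_getD _ pvMU "UTR" _ pvStep_get?_UTR]
    · rfl
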